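-- pv_equiv track=rewrite | github.com/pypi-data/pypi-mirror-11 | packages/pxp/pxp-0.0.1.tar.gz/pxp-0.0.1/pxp/util.py | point_to_source
-- ===== SOURCE A (Python) =====
-- import math
--
-- def point_to_source(source, position, fmt=(2, True, "~~~~~", "^")):
--   """Point to a position in source code.
--
--   source is the text we're pointing in.
--   position is a 2-tuple of (line_number, character_number) to point to.
--   fmt is a 4-tuple of formatting parameters, they are:
--     name               default  description
--     ----               -------  -----------
--     surrounding_lines  2        the number of lines above and below the target line to print
--     show_line_numbers  True     if true line numbers will be generated for the output_lines
--     tail_body          "~~~~~"  the body of the tail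
--     pointer_char       "^"      the character that will point to the position
--   """
--
--   surrounding_lines, show_line_numbers, tail_body, pointer_char = fmt
--
--   line_no, char_no = position
--
--   lines = source.split("\n")
--   line = lines[line_no]
--
--   if char_no >= len(tail_body):
--     tail = " " * (char_no - len(tail_body)) + tail_body + pointer_char
--   else:
--     tail = " " * char_no + pointer_char + tail_body
--
--   if show_line_numbers:
--     line_no_width = int(math.ceil(math.log10(max(1, line_no + surrounding_lines))) + 1)
--     line_fmt = "{0:" + str(line_no_width) + "}: {1}"
--   else:
--     line_fmt = "{1}"
--
--   pivot = line_no + 1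
--   output_lines = [(pivot, line), ("", tail)]
--   for i in range(surrounding_lines):
--     upper_ofst = i + 1
--     upper_idx = line_no + upper_ofst
--     lower_ofst = -upper_ofst
--     lower_idx = line_no + lower_ofst
--
--     if lower_idx >= 0:
--       output_lines.insert(0, (pivot + lower_ofst, lines[lower_idx]))
--     if upper_idx < len(lines):
--       output_lines.append((pivot + upper_ofst, lines[upper_idx]))
--
--   return "\n".join(line_fmt.format(n, c) for n, c in output_lines)
-- ===== SOURCE B (Python) =====
-- import math
--
-- def point_to_source(source, position, fmt=(2, True, "~~~~~", "^")):
--   """Point to a position in source code.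
--
--   Shows the target line with a pointer tail under it, plus up to
--   surrounding_lines of context above and below, built in one forward pass
--   over precomputed window bounds.
--   """
--   surrounding_lines, show_line_numbers, tail_body, pointer_char = fmt
--   line_no, char_no = position
--
--   lines = source.split("\n")
--
--   if char_no >= len(tail_body):
--     tail = " " * (char_no - len(tail_body)) + tail_body + pointer_char
--   else:
--     tail = " " * char_no + pointer_char + tail_body
--
--   if show_line_numbers:
--     line_no_width = int(math.ceil(math.log10(max(1, line_no + surrounding_lines))) + 1)
--     line_fmt = "{0:" + str(line_no_width) + "}: {1}"
--   else:
--     line_fmt = "{1}"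
--
--   lo = max(0, line_no - surrounding_lines)
--   hi = min(len(lines), line_no + surrounding_lines + 1)
--
--   out = []
--   for idx in range(lo, line_no):
--     out.append(line_fmt.format(idx + 1, lines[idx]))
--   out.append(line_fmt.format(line_no + 1, lines[line_no]))
--   out.append(line_fmt.format("", tail))
--   for idx in range(line_no + 1, hi):
--     out.append(line_fmt.format(idx + 1, lines[idx]))
--   return "\n".join(out)
-- ===== Notes on version B (the rewrite author's own statement) =====
-- stated objective: simpler
-- what changed: B precomputes the clamped window bounds lo/hi and builds the output in one forward pass (context above, target line, tail, context below), instead of A's symmetric outward expansion that grows a two-element list with insert(0)/append over offsets; Pre_ excludes only the inputs where A raises IndexError at lines[line_no].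
import Mathlib
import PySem

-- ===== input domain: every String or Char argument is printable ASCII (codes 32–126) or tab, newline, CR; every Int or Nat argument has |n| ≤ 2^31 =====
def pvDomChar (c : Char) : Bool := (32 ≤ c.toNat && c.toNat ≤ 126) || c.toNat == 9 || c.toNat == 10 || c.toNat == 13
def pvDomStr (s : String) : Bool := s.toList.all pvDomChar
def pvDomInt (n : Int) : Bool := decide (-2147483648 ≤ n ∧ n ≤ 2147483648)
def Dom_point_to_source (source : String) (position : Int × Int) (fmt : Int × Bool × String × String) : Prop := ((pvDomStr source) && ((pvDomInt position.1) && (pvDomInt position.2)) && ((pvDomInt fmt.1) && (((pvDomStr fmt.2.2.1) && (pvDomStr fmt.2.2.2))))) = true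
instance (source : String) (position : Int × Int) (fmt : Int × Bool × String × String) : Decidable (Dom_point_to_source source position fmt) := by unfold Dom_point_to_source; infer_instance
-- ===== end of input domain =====

-- B precomputes the clamped window bounds and builds the output in one forward pass
-- (context above, target line, tail, context below) instead of A's symmetric outward
-- expansion with insert(0)/append; objective: simpler decomposition, same results.
-- Both ports render the float width int(math.ceil(math.log10(m)) + 1) as the integer
-- digit count of m - 1 (plus one), which is exactly that value for every 1 ≤ m ≤ 2^32,
-- i.e. for all inputs in Dom.

-- shared helpers: lines of Python BOTH sources contain verbatim --

-- source.split("\n"): sep ≠ "", so split? is always `some`; the getD is never taken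
def pvSplitNL (source : String) : List String := (PySem.Str.split? source "\n").getD []

-- Python " " * n (n ≤ 0 gives "")
def pvSpaces (n : Int) : String := String.mk (PySem.List.pyRepeat [' '] n)

-- the tail string (the identical four lines of A and B)
def pvTail (char_no : Int) (tail_body pointer_char : String) : String :=
  if char_no ≥ PySem.Str.len tail_body then
    pvSpaces (char_no - PySem.Str.len tail_body) ++ tail_body ++ pointer_char
  else
    pvSpaces char_no ++ pointer_char ++ tail_body

-- int(math.ceil(math.log10(max(1, line_no + surrounding_lines))) + 1), in exact integer form
def pvLineNoWidth (line_no surrounding_lines : Int) : Int :=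
  let m := max 1 (line_no + surrounding_lines)
  (if m = 1 then 0 else PySem.Str.len (PySem.Int.toStr (m - 1))) + 1

-- "{0:w}".format(x) for x an int or "": right-justify with spaces to width w (= str.rjust)
def pvRJust (t : String) (w : Int) : String :=
  String.mk (PySem.List.pyRepeat [' '] (w - PySem.Str.len t) ++ t.toList)

-- line_fmt.format(n, c) ("{0:w}: {1}" / "{1}")
def pvLineFmt (shw : Bool) (w : Int) (row : Option Int × String) : String :=
  if shw then
    pvRJust (match row.1 with | some k => PySem.Int.toStr k | none => "") w ++ ": " ++ row.2
  else row.2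

-- ===== PORT A =====

-- the body of A's `for i in range(surrounding_lines)` loop (pivot = line_no + 1 inlined)
def pvStepA (lines : List String) (line_no : Int)
    (acc : List (Option Int × String)) (i : Int) : List (Option Int × String) :=
  let upper_ofst := i + 1
  let upper_idx := line_no + upper_ofst
  let lower_ofst := -upper_ofst
  let lower_idx := line_no + lower_ofst
  let acc := if lower_idx ≥ 0 then
      ((some ((line_no + 1) + lower_ofst), PySem.List.pyGetD lines lower_idx "")) :: acc
    else acc
  if upper_idx < PySem.List.len lines then
    acc ++ [(some ((line_no + 1) + upper_ofst), PySem.List.pyGetD lines upper_idx "")]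
  else acc

def point_to_source (source : String) (position : Int × Int) (fmt : Int × Bool × String × String) : String :=
  let surrounding_lines := fmt.1
  let show_line_numbers := fmt.2.1
  let tail_body := fmt.2.2.1
  let pointer_char := fmt.2.2.2
  let line_no := position.1
  let char_no := position.2
  let lines := pvSplitNL source
  match PySem.List.pyGet? lines line_no with
  | none => ""          -- lines[line_no] raises IndexError: excluded by Pre_
  | some line =>
    let tail := pvTail char_no tail_body pointer_char
    let line_fmt := if show_line_numbers then
        pvLineFmt true (pvLineNoWidth line_no surrounding_lines)
      else pvLineFmt false 0
    let output_lines : List (Option Int × String) := [(some (line_no + 1), line), (none, tail)]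
    let output_lines :=
      (PySem.List.pyRange 0 surrounding_lines 1).foldl (pvStepA lines line_no) output_lines
    PySem.Str.join "\n" (output_lines.map line_fmt)

-- ===== PORT B =====

-- the body of B's two `out.append(line_fmt.format(idx + 1, lines[idx]))` loops
def pvStepB (render : Option Int × String → String) (lines : List String)
    (acc : List String) (idx : Int) : List String :=
  acc ++ [render (some (idx + 1), PySem.List.pyGetD lines idx "")]

def point_to_source_alt (source : String) (position : Int × Int) (fmt : Int × Bool × String × String) : String :=
  let surrounding_lines := fmt.1
  let show_line_numbers := fmt.2.1
  let tail_body := fmt.2.2.1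
  let pointer_char := fmt.2.2.2
  let line_no := position.1
  let char_no := position.2
  let lines := pvSplitNL source
  let tail := pvTail char_no tail_body pointer_char
  let render := if show_line_numbers then
      pvLineFmt true (pvLineNoWidth line_no surrounding_lines)
    else pvLineFmt false 0
  let lo := max 0 (line_no - surrounding_lines)
  let hi := min (PySem.List.len lines) (line_no + surrounding_lines + 1)
  let out := (PySem.List.pyRange lo line_no 1).foldl (pvStepB render lines) []
  let out := out ++ [render (some (line_no + 1), PySem.List.pyGetD lines line_no ""),
                     render (none, tail)]
  let out := (PySem.List.pyRange (line_no + 1) hi 1).foldl (pvStepB render lines) out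
  PySem.Str.join "\n" out

-- ===== PRECONDITION & SPEC =====
-- Pre_ excludes exactly the inputs where A raises IndexError at `lines[line_no]`
-- (line_no outside Python's indexing range of source.split("\n")); A is total otherwise.
def Pre_point_to_source (source : String) (position : Int × Int) (fmt : Int × Bool × String × String) : Prop :=
  PySem.Raise.InRange (pvSplitNL source).length position.1
instance (source : String) (position : Int × Int) (fmt : Int × Bool × String × String) : Decidable (Pre_point_to_source source position fmt) := by
  unfold Pre_point_to_source PySem.Raise.InRange; infer_instance

def pvWitness_point_to_source : String × (Int × Int) × (Int × Bool × String × String) :=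
  ("a = 1\nb = a + 2\nc = b * 3", (1, 4), (2, true, "~~~~~", "^"))

def Spec_point_to_source (source : String) (position : Int × Int) (fmt : Int × Bool × String × String) (out : String) : Prop := out = point_to_source_alt source position fmt
instance (source : String) (position : Int × Int) (fmt : Int × Bool × String × String) (out : String) : Decidable (Spec_point_to_source source position fmt out) := by unfold Spec_point_to_source; infer_instance

-- ===== CLAIM (what is proved, stated in full; the proofs are below) =====
def Claim_equal_point_to_source : Prop := ∀ (source : String) (position : Int × Int) (fmt : Int × Bool × String × String), Dom_point_to_source source position fmt → Pre_point_to_source source position fmt → Spec_point_to_source source position fmt (point_to_source source position fmt)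

-- ===== LEMMAS AND PROOFS =====

-- the (number, text) row shown for source line j
def pvRow (lines : List String) (j : Int) : Option Int × String :=
  (some (j + 1), PySem.List.pyGetD lines j "")

lemma stepA_eq (lines : List String) (L : Int) (acc : List (Option Int × String)) (i : Int) :
    pvStepA lines L acc i =
      (if 0 ≤ L - (i + 1) then [pvRow lines (L - (i + 1))] else []) ++ acc ++
      (if L + (i + 1) < (lines.length : Int) then [pvRow lines (L + (i + 1))] else []) := by
  have h1 : L + -(i + 1) = L - (i + 1) := by ring
  have h2 : L + 1 + -(i + 1) = L - (i + 1) + 1 := by ring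
  have h3 : L + 1 + (i + 1) = L + (i + 1) + 1 := by ring
  simp only [pvStepA, pvRow, PySem.List.len_eq, h1, h2, h3, ge_iff_le]
  split_ifs <;> simp

-- invariant of A's loop: after k iterations the window extends min k · lines downward/upward
lemma A_loop (lines : List String) (L : Int) (init : List (Option Int × String)) (k : Nat) :
    (PySem.List.pyRange 0 (k : Int) 1).foldl (pvStepA lines L) init =
      (PySem.List.pyRange (L - min (k : Int) (max L 0)) L 1).map (pvRow lines) ++ init ++
      (PySem.List.pyRange (L + 1) (L + 1 + min (k : Int) (max ((lines.length : Int) - 1 - L) 0)) 1).map (pvRow lines) := by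
  induction k with
  | zero =>
      simp [PySem.List.pyRange_one_eq_nil (le_refl L),
            PySem.List.pyRange_one_eq_nil (le_refl (L + 1))]
  | succ k ih =>
      have hk : ((k + 1 : Nat) : Int) = (k : Int) + 1 := by push_cast; ring
      rw [hk, PySem.List.pyRange_one_succ_right (by positivity), List.foldl_append, ih,
          List.foldl_cons, List.foldl_nil, stepA_eq]
      by_cases hl : 0 ≤ L - ((k : Int) + 1) <;>
        by_cases hu : L + ((k : Int) + 1) < (lines.length : Int)
      · -- a line is added on both sides
        rw [if_pos hl, if_pos hu,
            show L - min ((k : Int) + 1) (max L 0) = L - ((k : Int) + 1) from by omega,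
            show L - min (k : Int) (max L 0) = L - (k : Int) from by omega,
            show L + 1 + min ((k : Int) + 1) (max ((lines.length : Int) - 1 - L) 0) =
              (L + 1 + (k : Int)) + 1 from by omega,
            show L + 1 + min (k : Int) (max ((lines.length : Int) - 1 - L) 0) =
              L + 1 + (k : Int) from by omega,
            PySem.List.pyRange_one_cons (show L - ((k : Int) + 1) < L from by omega),
            show L - ((k : Int) + 1) + 1 = L - (k : Int) from by ring,
            PySem.List.pyRange_one_succ_right (show L + 1 ≤ L + 1 + (k : Int) from by omega),
            show L + 1 + (k : Int) = L + ((k : Int) + 1) from by ring]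
        simp [List.append_assoc]
      · -- only a lower line is added
        rw [if_pos hl, if_neg hu,
            show L - min ((k : Int) + 1) (max L 0) = L - ((k : Int) + 1) from by omega,
            show L - min (k : Int) (max L 0) = L - (k : Int) from by omega,
            show L + 1 + min ((k : Int) + 1) (max ((lines.length : Int) - 1 - L) 0) =
              L + 1 + min (k : Int) (max ((lines.length : Int) - 1 - L) 0) from by omega,
            PySem.List.pyRange_one_cons (show L - ((k : Int) + 1) < L from by omega),
            show L - ((k : Int) + 1) + 1 = L - (k : Int) from by ring]
        simp [List.append_assoc]
      · -- only an upper line is added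
        rw [if_neg hl, if_pos hu,
            show L - min ((k : Int) + 1) (max L 0) = L - min (k : Int) (max L 0) from by omega,
            show L + 1 + min ((k : Int) + 1) (max ((lines.length : Int) - 1 - L) 0) =
              (L + 1 + (k : Int)) + 1 from by omega,
            show L + 1 + min (k : Int) (max ((lines.length : Int) - 1 - L) 0) =
              L + 1 + (k : Int) from by omega,
            PySem.List.pyRange_one_succ_right (show L + 1 ≤ L + 1 + (k : Int) from by omega),
            show L + 1 + (k : Int) = L + ((k : Int) + 1) from by ring]
        simp [List.append_assoc]
      · -- nothing is added
        rw [if_neg hl, if_neg hu,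
            show L - min ((k : Int) + 1) (max L 0) = L - min (k : Int) (max L 0) from by omega,
            show L + 1 + min ((k : Int) + 1) (max ((lines.length : Int) - 1 - L) 0) =
              L + 1 + min (k : Int) (max ((lines.length : Int) - 1 - L) 0) from by omega]
        simp

-- B's append loop is a map over its range
lemma B_loop (r : Option Int × String → String) (lines : List String)
    (l : List Int) (init : List String) :
    l.foldl (pvStepB r lines) init = init ++ l.map (fun j => r (pvRow lines j)) := by
  induction l generalizing init with
  | nil => simp
  | cons x xs ih => simp [pvStepB, pvRow, ih]

-- ===== VERDICT (by name: the statement is the Claim_ definition above) =====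
theorem point_to_source_spec : Claim_equal_point_to_source := by
  intro source position fmt _hDom hPre
  obtain ⟨L, char_no⟩ := position
  obtain ⟨s, shw, tail_body, pointer_char⟩ := fmt
  unfold Spec_point_to_source
  have hPre' : PySem.Raise.InRange (pvSplitNL source).length L := hPre
  unfold PySem.Raise.InRange at hPre'
  set lines := pvSplitNL source with hlines
  obtain ⟨line, hline⟩ : ∃ line, PySem.List.pyGet? lines L = some line := by
    cases h : PySem.List.pyGet? lines L with
    | none =>
        exfalso
        exact (PySem.List.pyGet?_eq_none_iff lines L).mp h ⟨hPre'.1, hPre'.2⟩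
    | some v => exact ⟨v, rfl⟩
  have hgetD : PySem.List.pyGetD lines L "" = line := by
    simp [PySem.List.pyGetD, hline]
  simp only [point_to_source, point_to_source_alt, ← hlines, hline, hgetD]
  rw [B_loop, B_loop]
  have hs : PySem.List.pyRange 0 s 1 = PySem.List.pyRange 0 ((s.toNat : Nat) : Int) 1 := by
    by_cases h : 0 ≤ s
    · rw [Int.toNat_of_nonneg h]
    · rw [PySem.List.pyRange_one_eq_nil (by omega),
          PySem.List.pyRange_one_eq_nil (by omega)]
  rw [hs, A_loop lines L _ s.toNat]
  -- the two window ranges coincide (as lists; for negative L or s both sides are empty)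
  have hlow : PySem.List.pyRange (L - min ((s.toNat : Nat) : Int) (max L 0)) L 1 =
      PySem.List.pyRange (max 0 (L - s)) L 1 := by
    by_cases hL : 0 ≤ L
    · by_cases hsn : 0 ≤ s
      · rw [show L - min ((s.toNat : Nat) : Int) (max L 0) = max 0 (L - s) from by omega]
      · rw [PySem.List.pyRange_one_eq_nil (by omega),
            PySem.List.pyRange_one_eq_nil (by omega)]
    · rw [PySem.List.pyRange_one_eq_nil (by omega),
          PySem.List.pyRange_one_eq_nil (by omega)]
  have hhigh : PySem.List.pyRange (L + 1) (L + 1 + min ((s.toNat : Nat) : Int) (max ((lines.length : Int) - 1 - L) 0)) 1 =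
      PySem.List.pyRange (L + 1) (min (PySem.List.len lines) (L + s + 1)) 1 := by
    simp only [PySem.List.len_eq]
    by_cases hsn : 0 ≤ s
    · rw [show L + 1 + min ((s.toNat : Nat) : Int) (max ((lines.length : Int) - 1 - L) 0) =
          min ((lines.length : Int)) (L + s + 1) from by omega]
    · rw [PySem.List.pyRange_one_eq_nil (by omega),
          PySem.List.pyRange_one_eq_nil (by omega)]
  rw [hlow, hhigh]
  simp [Function.comp_def]
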